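-- pv_equiv track=rewrite | github.com/shnhs/CoTe | 솔트룩스 코테/3.py | solution
-- ===== SOURCE A (Python) =====
-- def solution(encrypted_text, key, rotation):
--
--     # abc 문자열 리스트 생성
--     abc_list = []
--     for x in range(97, 123):
--         abc_list.append(chr(x))
--
--     # T는 문자열 길이
--     T = len(encrypted_text)
--     if rotation > 0:
--         # 앞의 rot % T 만큼 뒤로이동
--         before_rot = encrypted_text[(rotation%T):] + encrypted_text[:(rotation%T)]
--     else:
--         # 뒤의 rot % T 만틈 앞으로 이동
--         before_rot = encrypted_text[-(-rotation%T):] + encrypted_text[:-(-rotation%T)]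
--
--     # 암호화 이전 문자열 인덱스 계산
--     before_encrypted = []
--     for i, j in zip(before_rot, key):
--         before_encrypted.append((ord(i)-96) - (ord(j)-96))
--
--     # 정답리스트 생성
--     answer = []
--     for i in before_encrypted:
--         answer.append(abc_list[i-1])
--
--     return "".join(answer)
-- ===== SOURCE B (Python) =====
-- def solution(encrypted_text, key, rotation):
--     # One pass with modular indexing: no rotated copy, no alphabet list,
--     # no intermediate difference list.
--     T = len(encrypted_text)
--     offset = rotation % T
--     out = []
--     for k in range(min(T, len(key))):
--         d = ord(encrypted_text[(k + offset) % T]) - ord(key[k])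
--         out.append(chr(97 + (d - 1) % 26))
--     return "".join(out)
-- ===== Notes on version B (the rewrite author's own statement) =====
-- stated objective: alternative
-- what changed: Replaces the precomputed alphabet list, the slice-built rotated copy and the intermediate difference list by a single pass that indexes the original string modularly and maps each difference through chr(97+(d-1)%26).
import Mathlib
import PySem

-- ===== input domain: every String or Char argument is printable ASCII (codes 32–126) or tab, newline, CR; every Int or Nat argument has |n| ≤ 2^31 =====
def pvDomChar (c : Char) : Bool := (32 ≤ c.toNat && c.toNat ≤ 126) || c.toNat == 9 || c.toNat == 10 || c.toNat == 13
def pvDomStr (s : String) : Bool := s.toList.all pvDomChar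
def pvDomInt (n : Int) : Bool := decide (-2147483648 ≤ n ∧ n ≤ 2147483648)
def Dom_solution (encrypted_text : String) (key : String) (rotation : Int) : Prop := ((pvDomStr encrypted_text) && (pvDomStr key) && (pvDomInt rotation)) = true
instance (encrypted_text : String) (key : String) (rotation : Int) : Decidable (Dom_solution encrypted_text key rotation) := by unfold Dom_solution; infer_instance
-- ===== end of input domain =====

-- B replaces the alphabet list, the rotated slice copy and the difference list by one
-- modular-indexing pass; same cost, plainer structure (objective: alternative).


-- ===== PORT A =====
def solution (encrypted_text : String) (key : String) (rotation : Int) : String :=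
  -- abc_list = [chr(x) for x in range(97,123)] (built by an append loop)
  let abc_list : List Char :=
    (PySem.List.pyRange 97 123 1).foldl (fun acc x => acc ++ [Char.ofNat x.toNat]) []
  let cs := encrypted_text.toList
  let T : Int := cs.length
  -- rotation % T raises ZeroDivisionError in Python when T = 0: excluded by Pre_solution
  let before_rot : List Char :=
    if rotation > 0 then
      PySem.List.slice cs (some (PySem.Int.mod rotation T)) none ++
      PySem.List.slice cs none (some (PySem.Int.mod rotation T))
    else
      PySem.List.slice cs (some (-(PySem.Int.mod (-rotation) T))) none ++
      PySem.List.slice cs none (some (-(PySem.Int.mod (-rotation) T)))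
  let before_encrypted : List Int :=
    (before_rot.zip key.toList).foldl
      (fun acc p => acc ++ [((p.1.toNat : Int) - 96) - ((p.2.toNat : Int) - 96)]) []
  -- abc_list[i-1] raises IndexError outside [-26,25]: excluded by Pre_solution
  let answer : List Char :=
    before_encrypted.foldl (fun acc i => acc ++ [(PySem.List.pyGet? abc_list (i - 1)).getD 'a']) []
  String.ofList answer

-- ===== PORT B =====
def solution_alt (encrypted_text : String) (key : String) (rotation : Int) : String :=
  let cs := encrypted_text.toList
  let ks := key.toList
  let T : Int := cs.length
  let offset := PySem.Int.mod rotation T   -- rotation % 0 raises in Python: excluded by Pre_solution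
  let out : List Char :=
    (PySem.List.pyRange 0 (min T (ks.length : Int)) 1).foldl
      (fun acc k =>
        let d : Int := ((PySem.List.pyGetD cs (PySem.Int.mod (k + offset) T) 'a').toNat : Int)
                        - ((PySem.List.pyGetD ks k 'a').toNat : Int)
        acc ++ [Char.ofNat (97 + PySem.Int.mod (d - 1) 26).toNat]) []
  String.ofList out

-- ===== PRECONDITION & SPEC =====
-- Pre_ excludes exactly the inputs where the Python A raises: empty encrypted_text
-- (ZeroDivisionError from rotation % 0) and inputs where some rotated-text/key letter
-- difference leaves [-25, 26] (IndexError on abc_list[i-1]).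
def Pre_solution (encrypted_text : String) (key : String) (rotation : Int) : Prop :=
  encrypted_text.toList ≠ [] ∧
  ∀ p ∈ ((encrypted_text.toList.drop (PySem.Int.mod rotation (encrypted_text.toList.length : Int)).toNat ++
          encrypted_text.toList.take (PySem.Int.mod rotation (encrypted_text.toList.length : Int)).toNat).zip
          key.toList),
    -25 ≤ (p.1.toNat : Int) - (p.2.toNat : Int) ∧ (p.1.toNat : Int) - (p.2.toNat : Int) ≤ 26
instance (encrypted_text : String) (key : String) (rotation : Int) : Decidable (Pre_solution encrypted_text key rotation) := by unfold Pre_solution; infer_instance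

def pvWitness_solution : String × String × Int := ("abc", "abc", 1)

def Spec_solution (encrypted_text : String) (key : String) (rotation : Int) (out : String) : Prop := out = solution_alt encrypted_text key rotation
instance (encrypted_text : String) (key : String) (rotation : Int) (out : String) : Decidable (Spec_solution encrypted_text key rotation out) := by unfold Spec_solution; infer_instance

-- ===== CLAIM (what is proved, stated in full; the proofs are below) =====
def Claim_equal_solution : Prop := ∀ (encrypted_text : String) (key : String) (rotation : Int), Dom_solution encrypted_text key rotation → Pre_solution encrypted_text key rotation → Spec_solution encrypted_text key rotation (solution encrypted_text key rotation)


-- ===== LEMMAS AND PROOFS =====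

-- the alphabet loop of A builds 'a'..'z'
theorem pv_abc :
    (PySem.List.pyRange 97 123 1).foldl (fun acc x => acc ++ [Char.ofNat x.toNat]) [] =
      "abcdefghijklmnopqrstuvwxyz".toList := by decide

-- Python's negative-index lookup abc_list[j] equals chr(97 + j % 26) for -26 <= j <= 25
theorem pv_abc_get (j : Int) (h1 : -26 ≤ j) (h2 : j ≤ 25) :
    (PySem.List.pyGet? "abcdefghijklmnopqrstuvwxyz".toList j).getD 'a' =
      Char.ofNat (97 + PySem.Int.mod j 26).toNat := by
  interval_cases j <;> decide

theorem pv_negmod (a T : Int) (hT : 0 < T) (h : ¬ T ∣ a) : a % T + (-a) % T = T := by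
  have h1 : 0 ≤ a % T := Int.emod_nonneg a (ne_of_gt hT)
  have h2 : a % T < T := Int.emod_lt_of_pos a hT
  have h3 : a % T ≠ 0 := by
    intro h0; exact h (Int.dvd_of_emod_eq_zero h0)
  have h4 : (-a) % T = (T.natAbs : Int) - a % T := by
    rw [Int.neg_emod, if_neg h]
  have h5 : ((T.natAbs : Nat) : Int) = T := Int.natAbs_of_nonneg (le_of_lt hT)
  omega

-- A's two slice branches both produce the left rotation by (rotation mod T)
theorem pv_rot (cs : List Char) (rotation : Int) (hT : cs ≠ []) :
    (if rotation > 0 then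
      PySem.List.slice cs (some (PySem.Int.mod rotation (cs.length : Int))) none ++
      PySem.List.slice cs none (some (PySem.Int.mod rotation (cs.length : Int)))
    else
      PySem.List.slice cs (some (-(PySem.Int.mod (-rotation) (cs.length : Int)))) none ++
      PySem.List.slice cs none (some (-(PySem.Int.mod (-rotation) (cs.length : Int))))) =
    cs.drop (PySem.Int.mod rotation (cs.length : Int)).toNat ++
    cs.take (PySem.Int.mod rotation (cs.length : Int)).toNat := by
  have hlen : 0 < cs.length := List.length_pos_iff.mpr hT
  have hTpos : (0:Int) < (cs.length : Int) := by exact_mod_cast hlen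
  by_cases hr : rotation > 0
  · rw [if_pos hr]
    have h0 : 0 ≤ PySem.Int.mod rotation (cs.length:Int) := PySem.Int.mod_nonneg rotation hTpos
    rw [PySem.List.slice_from cs h0, PySem.List.slice_to cs h0]
  · rw [if_neg hr]
    have h0 : 0 ≤ PySem.Int.mod (-rotation) (cs.length:Int) := PySem.Int.mod_nonneg _ hTpos
    have hlt : PySem.Int.mod (-rotation) (cs.length:Int) < (cs.length:Int) := PySem.Int.mod_lt _ hTpos
    have hmod : PySem.Int.mod (-rotation) (cs.length:Int) = (-rotation) % (cs.length:Int) :=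
      PySem.Int.mod_eq_emod_of_pos hTpos
    have hmod2 : PySem.Int.mod rotation (cs.length:Int) = rotation % (cs.length:Int) :=
      PySem.Int.mod_eq_emod_of_pos hTpos
    by_cases hm0 : PySem.Int.mod (-rotation) (cs.length:Int) = 0
    · have hdvd : (cs.length:Int) ∣ rotation := by
        have := (PySem.Int.mod_eq_zero_iff_dvd (-rotation) (cs.length:Int)).mp hm0
        exact (dvd_neg).mp this
      have hz : PySem.Int.mod rotation (cs.length:Int) = 0 :=
        (PySem.Int.mod_eq_zero_iff_dvd rotation (cs.length:Int)).mpr hdvd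
      rw [hm0, hz]
      simp only [neg_zero, Int.toNat_zero, List.drop_zero, List.take_zero]
      rw [PySem.List.slice_to cs (le_refl 0)]
      simp [PySem.List.slice_none_none]
    · have hmpos : 0 < PySem.Int.mod (-rotation) (cs.length:Int) := lt_of_le_of_ne h0 (Ne.symm hm0)
      have hk : PySem.Int.mod (-rotation) (cs.length:Int)
          = (((PySem.Int.mod (-rotation) (cs.length:Int)).toNat : Nat) : Int) :=
        (Int.toNat_of_nonneg h0).symm
      have hkpos : 0 < (PySem.Int.mod (-rotation) (cs.length:Int)).toNat := by omega
      rw [hk, PySem.List.slice_from_neg_natCast cs _ hkpos,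
          PySem.List.slice_to_neg_natCast cs _ hkpos]
      have hnd : ¬ (cs.length:Int) ∣ rotation := by
        intro hd
        exact hm0 ((PySem.Int.mod_eq_zero_iff_dvd (-rotation) (cs.length:Int)).mpr (dvd_neg.mpr hd))
      have hsum := pv_negmod rotation (cs.length:Int) hTpos hnd
      have heq : (PySem.Int.mod rotation (cs.length:Int)).toNat
          = cs.length - (PySem.Int.mod (-rotation) (cs.length:Int)).toNat := by
        have h5 : 0 ≤ rotation % (cs.length:Int) := Int.emod_nonneg _ (ne_of_gt hTpos)
        omega
      rw [heq]

-- indexing the rotated list is modular indexing of the original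
theorem pv_rot_get (cs : List Char) (off i : Nat) (hoff : off < cs.length) (hi : i < cs.length) :
    (cs.drop off ++ cs.take off)[i]'(by simp; omega) = cs[(i + off) % cs.length]'(Nat.mod_lt _ (by omega)) := by
  by_cases hc : i < cs.length - off
  · have hm : (i + off) % cs.length = off + i := by
      rw [Nat.mod_eq_of_lt (by omega)]; omega
    simp only [hm]
    rw [List.getElem_append_left (by simp [List.length_drop]; omega), List.getElem_drop]
  · have hm : (i + off) % cs.length = i - (cs.length - off) := by
      rw [Nat.mod_eq_sub_mod (by omega), Nat.mod_eq_of_lt (by omega)]; omega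
    simp only [hm]
    rw [List.getElem_append_right (by simp [List.length_drop]; omega), List.getElem_take]
    simp [List.length_drop]

-- ===== VERDICT (by name: the statement is the Claim_ definition above) =====
theorem solution_spec : Claim_equal_solution := by
  intro t k r hDom hPre
  obtain ⟨hne, hbound⟩ := hPre
  unfold Spec_solution solution solution_alt
  simp only []
  rw [pv_abc, pv_rot t.toList r hne]
  rw [PySem.List.foldl_append_singleton_eq_map, PySem.List.foldl_append_singleton_eq_map,
      PySem.List.foldl_append_singleton_eq_map]
  congr 1
  simp only [List.nil_append, List.map_map]
  have hlen : 0 < t.toList.length := List.length_pos_iff.mpr hne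
  have hTpos : (0:Int) < (t.toList.length : Int) := by exact_mod_cast hlen
  have hoff0 : 0 ≤ PySem.Int.mod r (t.toList.length:Int) := PySem.Int.mod_nonneg r hTpos
  have hofflt : PySem.Int.mod r (t.toList.length:Int) < (t.toList.length:Int) :=
    PySem.Int.mod_lt r hTpos
  have hcast : PySem.Int.mod r (t.toList.length:Int)
      = ((PySem.Int.mod r (t.toList.length:Int)).toNat : Int) := (Int.toNat_of_nonneg hoff0).symm
  apply List.ext_getElem
  · simp [PySem.List.length_pyRange_one]
    omega
  · intro i h1 h2
    simp only [List.getElem_map, List.getElem_zip, PySem.List.getElem_pyRange_one, zero_add,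
      Function.comp_apply]
    simp only [List.length_map, PySem.List.length_pyRange_one] at h2
    have hik : i < k.toList.length := by omega
    have hit : i < t.toList.length := by omega
    set off := (PySem.Int.mod r (t.toList.length:Int)).toNat with hoffdef
    have hoffl : off < t.toList.length := by omega
    simp only [hcast, Int.toNat_natCast]
    have hks : PySem.List.pyGetD k.toList ((i:Int)) 'a' = k.toList[i] := by
      rw [PySem.List.pyGetD_natCast]; exact List.getD_eq_getElem _ _ hik
    have hmn : PySem.Int.mod ((i:Int) + (off:Int)) ((t.toList.length:Nat):Int)
        = (((i + off) % t.toList.length : Nat) : Int) := by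
      rw [← Nat.cast_add]; exact PySem.Int.mod_natCast _ _
    rw [hmn, hks, PySem.List.pyGetD_natCast,
        List.getD_eq_getElem _ _ (Nat.mod_lt _ (by omega)),
        ← pv_rot_get t.toList off i hoffl hit]
    have hrl : i < (t.toList.drop off ++ t.toList.take off).length := by
      simp only [List.length_append, List.length_drop, List.length_take]; omega
    have hmem : (((t.toList.drop off ++ t.toList.take off)[i]'hrl), k.toList[i])
        ∈ (t.toList.drop off ++ t.toList.take off).zip k.toList := by
      have hz : ((t.toList.drop off ++ t.toList.take off).zip k.toList)[i]'(by
            simp only [List.length_zip]; omega)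
          = (((t.toList.drop off ++ t.toList.take off)[i]'hrl), k.toList[i]) :=
        List.getElem_zip
      rw [← hz]; exact List.getElem_mem _
    obtain ⟨hb1, hb2⟩ := hbound _ hmem
    dsimp only at hb1 hb2
    rw [pv_abc_get _ (by omega) (by omega)]
    have harith : (((((t.toList.drop off ++ t.toList.take off)[i]'hrl).toNat : Int) - 96)
        - ((k.toList[i].toNat : Int) - 96)) - 1
        = (((t.toList.drop off ++ t.toList.take off)[i]'hrl).toNat : Int)
          - (k.toList[i].toNat : Int) - 1 := by ring
    rw [harith]
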